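-- pv_equiv track=rewrite | github.com/Piotreqsl/ASD | egz2019/2.py | opt_sum
-- ===== SOURCE A (Python) =====
-- def opt_sum(tab):
--
--     def minAbsVal(a,b):
--         if abs(a) < abs(b):
--             return a
--         else:
--             return b
--
--     def maxAbsVal(a,b):
--         if abs(a) > abs(b):
--             return a
--         else:
--             return b
--
--
--
--
--     n = len(tab)
--     DP = [[0 for i in range(n)] for j in range(n)]
--
--     ##DP[i][j] - maksymalna wartość bezwględna wyniku tymczasowego w sumie
--
--     ## sumy prefikowe
--     addedSums = [0] * (n + 1)
--
--     #dodajemy do obecnej wartosci wartosc wszystkich poprzednich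
--     for i in range(1,n + 1):
--         addedSums[i] = addedSums[i - 1] + tab[i - 1]
--
--
--     for length in range(1, n):
--         for start in range(n-length):
--             end = start+length
--             DP[start][end] = addedSums[end + 1] - addedSums[start]
--
--             best = float("inf")
--             for k in range(start, end):
--                 best = minAbsVal(maxAbsVal(DP[start][k], DP[k+1][end]), best)
--
--             DP[start][end]= maxAbsVal(best,DP[start][end])
--
--
--     return DP[0][n-1]
-- ===== SOURCE B (Python) =====
-- def opt_sum(tab):
--     # Top-down memoized recursion over intervals instead of A's bottom-up 2D table.
--     n = len(tab)
--     pref = [0]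
--     for x in tab:
--         pref.append(pref[-1] + x)
--
--     def maxAbsVal(a, b):
--         return a if abs(a) > abs(b) else b
--
--     memo = {}
--
--     def f(i, j):
--         if i == j:
--             return 0
--         key = (i, j)
--         if key in memo:
--             return memo[key]
--         total = pref[j + 1] - pref[i]
--         best = None
--         for k in range(i, j):
--             cand = maxAbsVal(f(i, k), f(k + 1, j))
--             if best is None or abs(cand) < abs(best):
--                 best = cand
--         res = maxAbsVal(best, total)
--         memo[key] = res
--         return res
--
--     return f(0, n - 1)
-- ===== Notes on version B (the rewrite author's own statement) =====
-- stated objective: alternative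
-- what changed: Replaces A's bottom-up 2D DP table (nested loops over interval lengths and starts, with in-place list writes and a float('inf') sentinel) by a top-down memoized recursion f(i,j) over intervals of the prefix-sum array, with the same strict-comparison tie-breaking.
-- outside the precondition, e.g. on opt_sum([]): A raises IndexError, B raises TypeError
import Mathlib
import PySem

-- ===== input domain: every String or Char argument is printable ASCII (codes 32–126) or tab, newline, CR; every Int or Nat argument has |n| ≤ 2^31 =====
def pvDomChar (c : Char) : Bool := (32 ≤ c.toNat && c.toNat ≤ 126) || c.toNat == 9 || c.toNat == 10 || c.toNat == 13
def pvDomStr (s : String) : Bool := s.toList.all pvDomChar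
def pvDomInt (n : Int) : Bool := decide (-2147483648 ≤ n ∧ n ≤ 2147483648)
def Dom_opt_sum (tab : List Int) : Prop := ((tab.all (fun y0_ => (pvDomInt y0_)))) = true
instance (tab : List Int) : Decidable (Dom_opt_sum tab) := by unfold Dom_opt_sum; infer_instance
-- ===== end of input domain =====

-- B replaces A's bottom-up 2D interval table by a top-down memoized recursion over
-- intervals on prefix sums (objective: alternative decomposition, same asymptotic cost).

-- ===== PORT A =====
-- maxAbsVal(a, b)
def pvMaxAbs (a b : Int) : Int := if |a| > |b| then a else b
-- minAbsVal(a, best) where best may still be float("inf") (encoded none): abs(a) < inf always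
def pvMinAbsInf (a : Int) (b : Option Int) : Option Int :=
  match b with
  | none => some a
  | some bv => if |a| < |bv| then some a else some bv
-- DP[i][j] read / DP[i][j] = v write (all indices produced by range(), always in range)
def pvGet2 (DP : List (List Int)) (i j : Int) : Int :=
  PySem.List.pyGetD (PySem.List.pyGetD DP i []) j 0
def pvSet2 (DP : List (List Int)) (i j : Int) (v : Int) : List (List Int) :=
  PySem.List.pySetD DP i (PySem.List.pySetD (PySem.List.pyGetD DP i []) j v)

def opt_sum (tab : List Int) : Int :=
  let n : Int := tab.length
  -- DP = [[0 for i in range(n)] for j in range(n)]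
  let DP0 : List (List Int) :=
    (PySem.List.pyRange 0 n 1).map (fun _ => (PySem.List.pyRange 0 n 1).map (fun _ => (0 : Int)))
  -- addedSums = [0] * (n + 1); for i in range(1, n+1): addedSums[i] = addedSums[i-1] + tab[i-1]
  let addedSums :=
    (PySem.List.pyRange 1 (n + 1) 1).foldl
      (fun s i => PySem.List.pySetD s i (PySem.List.pyGetD s (i - 1) 0 + PySem.List.pyGetD tab (i - 1) 0))
      (List.replicate (tab.length + 1) (0 : Int))
  let DP :=
    (PySem.List.pyRange 1 n 1).foldl (fun DP L =>
      (PySem.List.pyRange 0 (n - L) 1).foldl (fun DP start =>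
        let e := start + L
        let DP1 := pvSet2 DP start e
          (PySem.List.pyGetD addedSums (e + 1) 0 - PySem.List.pyGetD addedSums start 0)
        -- best = inf; for k in range(start, end): best = minAbsVal(maxAbsVal(DP[start][k], DP[k+1][end]), best)
        let best := (PySem.List.pyRange start e 1).foldl
          (fun b k => pvMinAbsInf (pvMaxAbs (pvGet2 DP1 start k) (pvGet2 DP1 (k + 1) e)) b)
          (none : Option Int)
        -- DP[start][end] = maxAbsVal(best, DP[start][end]); best = inf is unreachable (range(start,end) nonempty)
        pvSet2 DP1 start e
          (match best with
           | some bv => pvMaxAbs bv (pvGet2 DP1 start e)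
           | none => pvGet2 DP1 start e)) DP) DP0
  PySem.List.pyGetD (PySem.List.pyGetD DP 0 []) (n - 1) 0

-- ===== PORT B =====
-- B's own maxAbsVal(a, b)
def pvMaxAbsB (a b : Int) : Int := if |a| > |b| then a else b
-- f(i, j) with the memo dict threaded through explicitly; the fuel argument only makes the
-- recursion structural (fuel = len(tab) + 1 always suffices, proved below)
def pvF (pref : List Int) : Nat → Int → Int → PySem.Dict (Int × Int) Int → Int × PySem.Dict (Int × Int) Int
  | 0, _, _, memo => (0, memo)   -- unreachable with sufficient fuel
  | fuel + 1, i, j, memo =>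
    if i = j then (0, memo)
    else
      match memo.get? (i, j) with
      | some v => (v, memo)
      | none =>
        let total := PySem.List.pyGetD pref (j + 1) 0 - PySem.List.pyGetD pref i 0
        let st := (PySem.List.pyRange i j 1).foldl
          (fun (st : Option Int × PySem.Dict (Int × Int) Int) k =>
            let p1 := pvF pref fuel i k st.2
            let p2 := pvF pref fuel (k + 1) j p1.2
            let cand := pvMaxAbsB p1.1 p2.1
            (match st.1 with
             | none => some cand
             | some bv => if |cand| < |bv| then some cand else some bv, p2.2))
          ((none : Option Int), memo)
        let res := match st.1 with
          | some bv => pvMaxAbsB bv total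
          | none => total   -- unreachable: i < j so range(i, j) is nonempty
        (res, st.2.insert (i, j) res)

def opt_sum_alt (tab : List Int) : Int :=
  let n : Int := tab.length
  -- pref = [0]; for x in tab: pref.append(pref[-1] + x)
  let pref := tab.foldl (fun acc x => acc ++ [PySem.List.pyGetD acc (-1) 0 + x]) [(0 : Int)]
  (pvF pref (tab.length + 1) 0 (n - 1) PySem.Dict.empty).1

-- ===== PRECONDITION & SPEC =====
-- A raises IndexError on the empty list (DP[0][n-1] on the empty table DP); only that input is excluded.
def Pre_opt_sum (tab : List Int) : Prop := tab ≠ []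
instance (tab : List Int) : Decidable (Pre_opt_sum tab) := by unfold Pre_opt_sum; infer_instance
def pvWitness_opt_sum : List Int := [3, -1, 2]

def Spec_opt_sum (tab : List Int) (out : Int) : Prop := out = opt_sum_alt tab
instance (tab : List Int) (out : Int) : Decidable (Spec_opt_sum tab out) := by unfold Spec_opt_sum; infer_instance

-- ===== CLAIM (what is proved, stated in full; the proofs are below) =====
def Claim_equal_opt_sum : Prop := ∀ (tab : List Int), Dom_opt_sum tab → Pre_opt_sum tab → Spec_opt_sum tab (opt_sum tab)

-- ===== LEMMAS AND PROOFS =====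

-- canonical prefix sums: pvPartials s l = running sums of l starting from s; pvPref = Python's pref list
def pvPartials (s : Int) : List Int → List Int
  | [] => []
  | x :: xs => (s + x) :: pvPartials (s + x) xs

def pvPref (tab : List Int) : List Int := 0 :: pvPartials 0 tab

-- memo-less canonical recursion both ports are reduced to
def pvFs (pref : List Int) : Nat → Int → Int → Int
  | 0, _, _ => 0
  | fuel + 1, i, j =>
    if i = j then 0
    else
      match (PySem.List.pyRange i j 1).foldl
        (fun b k => pvMinAbsInf (pvMaxAbs (pvFs pref fuel i k) (pvFs pref fuel (k + 1) j)) b)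
        (none : Option Int) with
      | some bv => pvMaxAbs bv (PySem.List.pyGetD pref (j + 1) 0 - PySem.List.pyGetD pref i 0)
      | none => PySem.List.pyGetD pref (j + 1) 0 - PySem.List.pyGetD pref i 0

lemma pvFs_congr (pref : List Int) : ∀ (f1 f2 : Nat) (i j : Int),
    (j - i).toNat < f1 → (j - i).toNat < f2 → pvFs pref f1 i j = pvFs pref f2 i j := by
  intro f1
  induction f1 with
  | zero => intro f2 i j h1 h2; omega
  | succ f ih =>
    intro f2 i j h1 h2
    match f2, h2 with
    | f2 + 1, h2 =>
      simp only [pvFs]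
      by_cases hij : i = j
      · rw [if_pos hij, if_pos hij]
      · rw [if_neg hij, if_neg hij]
        have hb : (PySem.List.pyRange i j 1).foldl
            (fun b k => pvMinAbsInf (pvMaxAbs (pvFs pref f i k) (pvFs pref f (k + 1) j)) b)
            (none : Option Int)
          = (PySem.List.pyRange i j 1).foldl
            (fun b k => pvMinAbsInf (pvMaxAbs (pvFs pref f2 i k) (pvFs pref f2 (k + 1) j)) b)
            (none : Option Int) := by
          refine PySem.List.foldl_congr_mem _ _ _ _ (fun b k hk => ?_)
          rw [PySem.List.mem_pyRange_one] at hk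
          rw [ih f2 i k (by omega) (by omega), ih f2 (k + 1) j (by omega) (by omega)]
        rw [hb]

-- ---------- B side ----------

lemma pvMaxAbsB_eq (a b : Int) : pvMaxAbsB a b = pvMaxAbs a b := rfl

def pvInv (pref : List Int) (memo : PySem.Dict (Int × Int) Int) : Prop :=
  ∀ i j v, memo.get? (i, j) = some v → v = pvFs pref ((j - i).toNat + 1) i j

lemma pvF_correct (pref : List Int) : ∀ (fuel : Nat) (i j : Int) (memo : PySem.Dict (Int × Int) Int),
    (j - i).toNat < fuel → pvInv pref memo →
    (pvF pref fuel i j memo).1 = pvFs pref fuel i j ∧ pvInv pref (pvF pref fuel i j memo).2 := by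
  intro fuel
  induction fuel with
  | zero => intro i j memo h _; omega
  | succ fuel ih =>
    intro i j memo h hinv
    by_cases hij : i = j
    · constructor
      · simp [pvF, pvFs, hij]
      · simpa [pvF, hij] using hinv
    · cases hmv : memo.get? (i, j) with
      | some v =>
        constructor
        · simp only [pvF, if_neg hij, hmv]
          rw [hinv i j v hmv]
          exact pvFs_congr pref _ _ i j (by omega) (by omega)
        · simpa [pvF, hij, hmv] using hinv
      | none =>
        have key : ∀ (l : List Int), (∀ k ∈ l, i ≤ k ∧ k < j) →
            ∀ (b : Option Int) (m : PySem.Dict (Int × Int) Int), pvInv pref m →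
            (l.foldl (fun (st : Option Int × PySem.Dict (Int × Int) Int) k =>
              let p1 := pvF pref fuel i k st.2
              let p2 := pvF pref fuel (k + 1) j p1.2
              let cand := pvMaxAbs p1.1 p2.1
              (match st.1 with
               | none => some cand
               | some bv => if |cand| < |bv| then some cand else some bv, p2.2)) (b, m)).1
              = l.foldl (fun b k =>
                  pvMinAbsInf (pvMaxAbs (pvFs pref fuel i k) (pvFs pref fuel (k + 1) j)) b) b
            ∧ pvInv pref (l.foldl (fun (st : Option Int × PySem.Dict (Int × Int) Int) k =>
              let p1 := pvF pref fuel i k st.2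
              let p2 := pvF pref fuel (k + 1) j p1.2
              let cand := pvMaxAbs p1.1 p2.1
              (match st.1 with
               | none => some cand
               | some bv => if |cand| < |bv| then some cand else some bv, p2.2)) (b, m)).2 := by
          intro l
          induction l with
          | nil => intro _ b m hm; exact ⟨rfl, hm⟩
          | cons k ks ihl =>
            intro hmem b m hm
            have hk := hmem k (List.mem_cons_self)
            have h1 := ih i k m (by omega) hm
            have h2 := ih (k + 1) j (pvF pref fuel i k m).2 (by omega) h1.2
            simp only [List.foldl_cons]
            have hstep : (let p1 := pvF pref fuel i k m
              let p2 := pvF pref fuel (k + 1) j p1.2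
              let cand := pvMaxAbs p1.1 p2.1
              ((match b with
               | none => some cand
               | some bv => if |cand| < |bv| then some cand else some bv : Option Int), p2.2))
              = (pvMinAbsInf (pvMaxAbs (pvFs pref fuel i k) (pvFs pref fuel (k + 1) j)) b,
                 (pvF pref fuel (k + 1) j (pvF pref fuel i k m).2).2) := by
              simp only [h1.1, h2.1]
              cases b <;> rfl
            rw [hstep]
            exact ihl (fun k' hk' => hmem k' (List.mem_cons_of_mem _ hk'))
              (pvMinAbsInf (pvMaxAbs (pvFs pref fuel i k) (pvFs pref fuel (k + 1) j)) b)
              _ h2.2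
        have hkey := key (PySem.List.pyRange i j 1)
          (fun k hk => by rw [PySem.List.mem_pyRange_one] at hk; exact hk)
          (none : Option Int) memo hinv
        constructor
        · simp only [pvF, pvMaxAbsB_eq, if_neg hij, hmv, pvFs]
          rw [hkey.1]
        · simp only [pvF, pvMaxAbsB_eq, if_neg hij, hmv]
          intro i' j' v hv
          rw [PySem.Dict.get?_insert] at hv
          by_cases hc : (i', j') = (i, j)
          · rw [if_pos hc] at hv
            rw [Prod.mk.injEq] at hc
            obtain ⟨hi', hj'⟩ := hc
            injection hv with hv'
            subst hv'
            rw [hi', hj']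
            have : (PySem.List.pyRange i j 1).foldl (fun (st : Option Int × PySem.Dict (Int × Int) Int) k =>
              let p1 := pvF pref fuel i k st.2
              let p2 := pvF pref fuel (k + 1) j p1.2
              let cand := pvMaxAbs p1.1 p2.1
              (match st.1 with
               | none => some cand
               | some bv => if |cand| < |bv| then some cand else some bv, p2.2)) (none, memo)
              = ((PySem.List.pyRange i j 1).foldl (fun b k =>
                  pvMinAbsInf (pvMaxAbs (pvFs pref fuel i k) (pvFs pref fuel (k + 1) j)) b) none,
                 ((PySem.List.pyRange i j 1).foldl (fun (st : Option Int × PySem.Dict (Int × Int) Int) k =>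
              let p1 := pvF pref fuel i k st.2
              let p2 := pvF pref fuel (k + 1) j p1.2
              let cand := pvMaxAbs p1.1 p2.1
              (match st.1 with
               | none => some cand
               | some bv => if |cand| < |bv| then some cand else some bv, p2.2)) (none, memo)).2) := by
              exact Prod.ext hkey.1 rfl
            rw [this]
            rw [← pvFs_congr pref (fuel + 1) ((j - i).toNat + 1) i j (by omega) (by omega)]
            simp only [pvFs, if_neg hij]
          · rw [if_neg hc] at hv
            exact hkey.2 i' j' v hv
  

lemma pvFoldB : ∀ (l acc : List Int), acc ≠ [] →
    l.foldl (fun acc x => acc ++ [PySem.List.pyGetD acc (-1) 0 + x]) acc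
      = acc ++ pvPartials (PySem.List.pyGetD acc (-1) 0) l := by
  intro l
  induction l with
  | nil => intro acc h; simp [pvPartials]
  | cons x xs ih =>
    intro acc h
    simp only [List.foldl_cons]
    rw [ih (acc ++ [PySem.List.pyGetD acc (-1) 0 + x]) (by simp)]
    rw [PySem.List.pyGetD_neg_one_append_singleton]
    simp [pvPartials]

lemma opt_sum_alt_eq (tab : List Int) :
    opt_sum_alt tab = pvFs (pvPref tab) (tab.length + 1) 0 ((tab.length : Int) - 1) := by
  have hpref : tab.foldl (fun acc x => acc ++ [PySem.List.pyGetD acc (-1) 0 + x]) [(0 : Int)]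
      = pvPref tab := by
    rw [pvFoldB tab [0] (by simp)]
    rfl
  have hinv : pvInv (pvPref tab) PySem.Dict.empty := by
    intro i j v hv
    rw [PySem.Dict.get?_empty] at hv
    cases hv
  simp only [opt_sum_alt]
  rw [hpref]
  exact (pvF_correct (pvPref tab) (tab.length + 1) 0 ((tab.length : Int) - 1)
    PySem.Dict.empty (by omega) hinv).1

-- ---------- A side ----------

lemma pvPartials_append (s : Int) (l : List Int) (x : Int) :
    pvPartials s (l ++ [x]) = pvPartials s l ++ [s + l.sum + x] := by
  induction l generalizing s with
  | nil => simp [pvPartials]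
  | cons y ys ih => simp [pvPartials, ih]; ring_nf

lemma pvPartials_length (s : Int) (l : List Int) : (pvPartials s l).length = l.length := by
  induction l generalizing s with
  | nil => rfl
  | cons y ys ih => simp [pvPartials, ih]

lemma pvPartials_getD (l : List Int) : ∀ (s : Int) (m : Nat), m < l.length →
    (pvPartials s l).getD m 0 = s + (l.take (m + 1)).sum := by
  induction l with
  | nil => intro s m h; simp at h
  | cons y ys ih =>
    intro s m h
    cases m with
    | zero => simp [pvPartials]
    | succ m =>
      simp only [pvPartials, List.getD_cons_succ, List.take_succ_cons, List.sum_cons]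
      rw [ih (s + y) m (by simpa using h)]
      ring

lemma pvPref_getD (tab : List Int) (i : Int) (h0 : 0 ≤ i) (h1 : i ≤ tab.length) :
    PySem.List.pyGetD (pvPref tab) i 0 = (tab.take i.toNat).sum := by
  rw [show i = ((i.toNat : Nat) : Int) by omega, PySem.List.pyGetD_natCast]
  rcases hm : i.toNat with _ | m
  · simp [pvPref]
  · simp only [pvPref, List.getD_cons_succ, Int.toNat_natCast]
    rw [pvPartials_getD tab 0 m (by omega)]
    ring

lemma addedSums_eq (tab : List Int) :
    (PySem.List.pyRange 1 ((tab.length : Int) + 1) 1).foldl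
      (fun s i => PySem.List.pySetD s i (PySem.List.pyGetD s (i - 1) 0 + PySem.List.pyGetD tab (i - 1) 0))
      (List.replicate (tab.length + 1) (0 : Int))
    = pvPref tab := by
  have main : ∀ (m : Nat), m ≤ tab.length →
      (PySem.List.pyRange 1 ((m : Int) + 1) 1).foldl
        (fun s i => PySem.List.pySetD s i (PySem.List.pyGetD s (i - 1) 0 + PySem.List.pyGetD tab (i - 1) 0))
        (List.replicate (tab.length + 1) (0 : Int))
      = pvPref (tab.take m) ++ List.replicate (tab.length - m) (0 : Int) := by
    intro m
    induction m with
    | zero =>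
      intro _
      rw [PySem.List.pyRange_one_eq_nil (by omega)]
      simp [pvPref, pvPartials, List.replicate_succ]
    | succ m ihm =>
      intro hm
      have hcast : ((m + 1 : Nat) : Int) + 1 = ((m : Int) + 1) + 1 := by push_cast; ring
      rw [hcast, PySem.List.pyRange_one_succ_right (by omega), List.foldl_append,
        List.foldl_cons, List.foldl_nil, ihm (by omega)]
      have hlenL : (pvPref (tab.take m)).length = m + 1 := by
        simp [pvPref, pvPartials_length, List.length_take, Nat.min_eq_left (by omega : m ≤ tab.length)]
      have hidx : (m : Int) + 1 - 1 = ((m : Nat) : Int) := by ring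
      rw [hidx]
      -- the two reads
      have hread1 : PySem.List.pyGetD (pvPref (tab.take m) ++ List.replicate (tab.length - m) (0 : Int)) ((m : Nat) : Int) 0
          = (tab.take m).sum := by
        rw [PySem.List.pyGetD_natCast, List.getD_append _ _ _ _ (by omega)]
        have := pvPref_getD (tab.take m) ((m : Nat) : Int) (by omega)
          (by simp [List.length_take]; omega)
        rw [PySem.List.pyGetD_natCast] at this
        rw [this]
        simp [List.take_take]
      have hread2 : PySem.List.pyGetD tab ((m : Nat) : Int) 0 = tab.getD m 0 := by
        rw [PySem.List.pyGetD_natCast]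
      rw [hread1, hread2]
      -- the write
      have hset : PySem.List.pySetD (pvPref (tab.take m) ++ List.replicate (tab.length - m) (0 : Int))
          ((m : Int) + 1) ((tab.take m).sum + tab.getD m 0)
          = (pvPref (tab.take m) ++ [(tab.take m).sum + tab.getD m 0])
            ++ List.replicate (tab.length - (m + 1)) (0 : Int) := by
        rw [show ((m : Int) + 1) = (((m + 1 : Nat)) : Int) by push_cast; ring, PySem.List.pySetD_natCast]
        rw [List.set_append_right _ _ (by omega)]
        rw [show m + 1 - (pvPref (tab.take m)).length = 0 by omega]
        rw [show tab.length - m = (tab.length - (m + 1)) + 1 by omega, List.replicate_succ,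
          List.set_cons_zero, List.append_assoc]
        rfl
      rw [hset]
      congr 1
      -- pvPref (take (m+1)) = pvPref (take m) ++ [sum (take m) + tab[m]]
      have htk : tab.take (m + 1) = tab.take m ++ [tab.getD m 0] := by
        rw [List.take_add_one]
        congr 1
        have hm' : m < tab.length := by omega
        rw [List.getElem?_eq_getElem hm']
        simp [List.getD_eq_getElem?_getD, List.getElem?_eq_getElem hm']
      rw [htk]
      simp [pvPref, pvPartials_append]
  have h := main tab.length (le_refl _)
  rw [List.take_length] at h
  simpa using h

-- the table of values tabulated by a function on [0, n) × [0, n)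
def pvTabOf (n : Int) (g : Int → Int → Int) : List (List Int) :=
  (PySem.List.pyRange 0 n 1).map (fun s => (PySem.List.pyRange 0 n 1).map (fun e => g s e))

-- A's DP table after lengths ≤ L are done and, at length L+1, starts < t are done
def pvMix (pref : List Int) (L t : Int) (s e : Int) : Int :=
  if s ≤ e ∧ (e - s ≤ L ∨ (e - s = L + 1 ∧ s < t)) then pvFs pref ((e - s).toNat + 1) s e else 0

lemma pvTabOf_congr (n : Int) (g g' : Int → Int → Int)
    (h : ∀ s e, 0 ≤ s → s < n → 0 ≤ e → e < n → g s e = g' s e) :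
    pvTabOf n g = pvTabOf n g' := by
  unfold pvTabOf
  refine List.map_congr_left (fun s hs => ?_)
  rw [PySem.List.mem_pyRange_one] at hs
  exact List.map_congr_left (fun e he => by
    rw [PySem.List.mem_pyRange_one] at he
    exact h s e hs.1 hs.2 he.1 he.2)

lemma pvGet2_tabOf (n : Int) (g : Int → Int → Int) (i j : Int)
    (h0 : 0 ≤ i) (h1 : i < n) (h2 : 0 ≤ j) (h3 : j < n) :
    pvGet2 (pvTabOf n g) i j = g i j := by
  unfold pvGet2 pvTabOf
  rw [PySem.List.pyGetD_map_pyRange_of_nonneg _ _ _ _ h0 h1,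
      PySem.List.pyGetD_map_pyRange_of_nonneg _ _ _ _ h2 h3]

lemma pySetD_map_pyRange {α : Type} (f : Int → α) (n i : Int) (v : α)
    (h0 : 0 ≤ i) (_h1 : i < n) :
    PySem.List.pySetD ((PySem.List.pyRange 0 n 1).map f) i v
      = (PySem.List.pyRange 0 n 1).map (fun x => if x = i then v else f x) := by
  rw [PySem.List.pySetD_of_nonneg _ _ h0]
  apply List.ext_getElem
  · simp
  · intro k hk1 hk2
    simp only [List.getElem_set, List.getElem_map] at *
    rw [PySem.List.getElem_pyRange_one]
    have hkn : k < (n - 0).toNat := by simpa [PySem.List.length_pyRange_one] using hk2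
    by_cases hc : i.toNat = k
    · rw [if_pos hc, if_pos (by omega)]
    · rw [if_neg hc, if_neg (by omega)]

lemma pvSet2_tabOf (n : Int) (g : Int → Int → Int) (i j : Int) (v : Int)
    (h0 : 0 ≤ i) (h1 : i < n) (h2 : 0 ≤ j) (h3 : j < n) :
    pvSet2 (pvTabOf n g) i j v = pvTabOf n (fun s e => if s = i ∧ e = j then v else g s e) := by
  unfold pvSet2 pvTabOf
  rw [PySem.List.pyGetD_map_pyRange_of_nonneg _ _ _ _ h0 h1]
  rw [pySetD_map_pyRange _ _ _ _ h2 h3]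
  rw [pySetD_map_pyRange _ _ _ _ h0 h1]
  refine List.map_congr_left (fun s hs => ?_)
  beta_reduce
  by_cases hsi : s = i
  · rw [if_pos hsi]
    refine List.map_congr_left (fun e he => ?_)
    beta_reduce
    by_cases hej : e = j
    · rw [if_pos hej, if_pos ⟨hsi, hej⟩]
    · rw [if_neg hej, if_neg (by tauto)]
      rw [hsi]
  · rw [if_neg hsi]
    refine List.map_congr_left (fun e he => ?_)
    beta_reduce
    rw [if_neg (by tauto)]

-- the port's inner loop body, named for the proofs (definitionally equal to the lambda in opt_sum)
def pvInnerStep (pref : List Int) (L : Int) (DP : List (List Int)) (start : Int) : List (List Int) :=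
  let e := start + L
  let DP1 := pvSet2 DP start e (PySem.List.pyGetD pref (e + 1) 0 - PySem.List.pyGetD pref start 0)
  let best := (PySem.List.pyRange start e 1).foldl
    (fun b k => pvMinAbsInf (pvMaxAbs (pvGet2 DP1 start k) (pvGet2 DP1 (k + 1) e)) b)
    (none : Option Int)
  pvSet2 DP1 start e
    (match best with
     | some bv => pvMaxAbs bv (pvGet2 DP1 start e)
     | none => pvGet2 DP1 start e)

lemma pvInnerStep_eq (pref : List Int) (n ℓ t : Int) (h1 : 1 ≤ ℓ) (ht0 : 0 ≤ t) (ht : t < n - ℓ) :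
    pvInnerStep pref ℓ (pvTabOf n (pvMix pref (ℓ - 1) t)) t = pvTabOf n (pvMix pref (ℓ - 1) (t + 1)) := by
  simp only [pvInnerStep]
  rw [pvSet2_tabOf n _ t (t + ℓ) _ ht0 (by omega) (by omega) (by omega)]
  set g1 : Int → Int → Int := fun s e =>
    if s = t ∧ e = t + ℓ then PySem.List.pyGetD pref (t + ℓ + 1) 0 - PySem.List.pyGetD pref t 0
    else pvMix pref (ℓ - 1) t s e with hg1
  have hfold : (PySem.List.pyRange t (t + ℓ) 1).foldl
      (fun b k => pvMinAbsInf (pvMaxAbs (pvGet2 (pvTabOf n g1) t k) (pvGet2 (pvTabOf n g1) (k + 1) (t + ℓ))) b)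
      (none : Option Int)
      = (PySem.List.pyRange t (t + ℓ) 1).foldl
      (fun b k => pvMinAbsInf (pvMaxAbs (pvFs pref ℓ.toNat t k) (pvFs pref ℓ.toNat (k + 1) (t + ℓ))) b)
      (none : Option Int) := by
    refine PySem.List.foldl_congr_mem _ _ _ _ (fun b k hk => ?_)
    rw [PySem.List.mem_pyRange_one] at hk
    rw [pvGet2_tabOf n g1 t k ht0 (by omega) (by omega) (by omega),
        pvGet2_tabOf n g1 (k + 1) (t + ℓ) (by omega) (by omega) (by omega) (by omega)]
    have e1 : g1 t k = pvFs pref ((k - t).toNat + 1) t k := by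
      rw [hg1]
      beta_reduce
      rw [if_neg (by rintro ⟨-, h⟩; omega)]
      unfold pvMix
      rw [if_pos ⟨by omega, Or.inl (by omega)⟩]
    have e2 : g1 (k + 1) (t + ℓ) = pvFs pref ((t + ℓ - (k + 1)).toNat + 1) (k + 1) (t + ℓ) := by
      rw [hg1]
      beta_reduce
      rw [if_neg (by rintro ⟨h, -⟩; omega)]
      unfold pvMix
      rw [if_pos ⟨by omega, Or.inl (by omega)⟩]
    rw [e1, e2, pvFs_congr pref ((k - t).toNat + 1) ℓ.toNat t k (by omega) (by omega),
        pvFs_congr pref ((t + ℓ - (k + 1)).toNat + 1) ℓ.toNat (k + 1) (t + ℓ) (by omega) (by omega)]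
  rw [hfold]
  have hg1te : pvGet2 (pvTabOf n g1) t (t + ℓ)
      = PySem.List.pyGetD pref (t + ℓ + 1) 0 - PySem.List.pyGetD pref t 0 := by
    rw [pvGet2_tabOf n g1 t (t + ℓ) ht0 (by omega) (by omega) (by omega), hg1]
    beta_reduce
    rw [if_pos ⟨rfl, rfl⟩]
  rw [hg1te]
  rw [pvSet2_tabOf n g1 t (t + ℓ) _ ht0 (by omega) (by omega) (by omega)]
  refine pvTabOf_congr n _ _ (fun s e hs0 hsn he0 hen => ?_)
  beta_reduce
  by_cases hc : s = t ∧ e = t + ℓ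
  · rw [if_pos hc]
    obtain ⟨hs, he⟩ := hc
    rw [hs, he]
    unfold pvMix
    rw [if_pos ⟨by omega, Or.inr ⟨by omega, by omega⟩⟩]
    rw [show (t + ℓ - t).toNat = ℓ.toNat by omega]
    simp only [pvFs]
    rw [if_neg (by omega : ¬ t = t + ℓ)]
  · rw [if_neg hc, hg1]
    beta_reduce
    rw [if_neg hc]
    unfold pvMix
    rcases not_and_or.mp hc with h | h <;> (split_ifs with h1 h2 <;> first | rfl | omega)

lemma inner_loop (pref : List Int) (n ℓ : Int) (h1 : 1 ≤ ℓ) :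
    ∀ (t : Nat), (t : Int) ≤ n - ℓ →
    (PySem.List.pyRange 0 (t : Int) 1).foldl (pvInnerStep pref ℓ) (pvTabOf n (pvMix pref (ℓ - 1) 0))
    = pvTabOf n (pvMix pref (ℓ - 1) (t : Int)) := by
  intro t
  induction t with
  | zero =>
    intro _
    rw [PySem.List.pyRange_one_eq_nil (by omega)]
    simp only [List.foldl_nil, Nat.cast_zero]
  | succ t iht =>
    intro ht
    rw [show ((t + 1 : Nat) : Int) = (t : Int) + 1 by push_cast; ring]
    rw [PySem.List.pyRange_one_succ_right (by omega), List.foldl_append, iht (by omega),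
      List.foldl_cons, List.foldl_nil]
    exact pvInnerStep_eq pref n ℓ (t : Int) h1 (by omega) (by omega)

lemma outer_loop (pref : List Int) (n : Int) : ∀ (M : Nat), (M : Int) ≤ n - 1 →
    (PySem.List.pyRange 1 ((M : Int) + 1) 1).foldl
      (fun DP L => (PySem.List.pyRange 0 (n - L) 1).foldl (pvInnerStep pref L) DP)
      (pvTabOf n (pvMix pref 0 0))
    = pvTabOf n (pvMix pref (M : Int) 0) := by
  intro M
  induction M with
  | zero =>
    intro _
    rw [PySem.List.pyRange_one_eq_nil (by omega)]
    simp only [List.foldl_nil, Nat.cast_zero]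
  | succ M ihM =>
    intro hM
    rw [show ((M + 1 : Nat) : Int) = (M : Int) + 1 by push_cast; ring]
    rw [PySem.List.pyRange_one_succ_right (by omega), List.foldl_append, ihM (by omega),
      List.foldl_cons, List.foldl_nil]
    rw [show pvMix pref (M : Int) 0 = pvMix pref ((M : Int) + 1 - 1) 0 from by norm_num]
    have hc : ((n - ((M : Int) + 1)).toNat : Int) = n - ((M : Int) + 1) := by omega
    rw [← hc]
    rw [inner_loop pref n ((M : Int) + 1) (by omega) (n - ((M : Int) + 1)).toNat (by omega)]
    rw [hc]
    refine pvTabOf_congr n _ _ (fun s e hs0 hsn he0 hen => ?_)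
    unfold pvMix
    split_ifs with h1 h2 <;> first | rfl | omega

lemma opt_sum_eq (tab : List Int) (h : tab ≠ []) :
    opt_sum tab = pvFs (pvPref tab) tab.length 0 ((tab.length : Int) - 1) := by
  have hlen : 1 ≤ tab.length := List.length_pos_iff.mpr h
  have hDP0 : (PySem.List.pyRange 0 (tab.length : Int) 1).map
      (fun _ => (PySem.List.pyRange 0 (tab.length : Int) 1).map (fun _ => (0 : Int)))
      = pvTabOf (tab.length : Int) (pvMix (pvPref tab) 0 0) := by
    unfold pvTabOf
    refine List.map_congr_left (fun s hs => ?_)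
    rw [PySem.List.mem_pyRange_one] at hs
    refine List.map_congr_left (fun e he => ?_)
    rw [PySem.List.mem_pyRange_one] at he
    unfold pvMix
    split_ifs with hcond
    · rw [show e = s by omega]
      simp [pvFs]
    · rfl
  have key : PySem.List.pyGetD
      (PySem.List.pyGetD
        ((PySem.List.pyRange 1 (tab.length : Int) 1).foldl
          (fun DP L => (PySem.List.pyRange 0 ((tab.length : Int) - L) 1).foldl (pvInnerStep (pvPref tab) L) DP)
          ((PySem.List.pyRange 0 (tab.length : Int) 1).map
            (fun _ => (PySem.List.pyRange 0 (tab.length : Int) 1).map (fun _ => (0 : Int)))))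
        0 [])
      ((tab.length : Int) - 1) 0
      = pvFs (pvPref tab) tab.length 0 ((tab.length : Int) - 1) := by
    rw [hDP0]
    have heq : PySem.List.pyRange 1 (tab.length : Int) 1
        = PySem.List.pyRange 1 (((tab.length - 1 : Nat) : Int) + 1) 1 := by
      rw [show ((tab.length - 1 : Nat) : Int) + 1 = (tab.length : Int) by omega]
    rw [heq, outer_loop (pvPref tab) (tab.length : Int) (tab.length - 1) (by omega)]
    have hread : PySem.List.pyGetD
        (PySem.List.pyGetD (pvTabOf (tab.length : Int) (pvMix (pvPref tab) ((tab.length - 1 : Nat) : Int) 0)) 0 [])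
        ((tab.length : Int) - 1) 0
        = pvMix (pvPref tab) ((tab.length - 1 : Nat) : Int) 0 0 ((tab.length : Int) - 1) :=
      pvGet2_tabOf (tab.length : Int) _ 0 ((tab.length : Int) - 1)
        (le_refl 0) (by omega) (by omega) (by omega)
    rw [hread]
    unfold pvMix
    rw [if_pos ⟨by omega, Or.inl (by omega)⟩]
    exact pvFs_congr (pvPref tab) _ _ 0 ((tab.length : Int) - 1) (by omega) (by omega)
  have hgoal : opt_sum tab = PySem.List.pyGetD
      (PySem.List.pyGetD
        ((PySem.List.pyRange 1 (tab.length : Int) 1).foldl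
          (fun DP L => (PySem.List.pyRange 0 ((tab.length : Int) - L) 1).foldl (pvInnerStep (pvPref tab) L) DP)
          ((PySem.List.pyRange 0 (tab.length : Int) 1).map
            (fun _ => (PySem.List.pyRange 0 (tab.length : Int) 1).map (fun _ => (0 : Int)))))
        0 [])
      ((tab.length : Int) - 1) 0 := by
    simp only [opt_sum]
    rw [addedSums_eq]
    rfl
  rw [hgoal, key]

-- ===== VERDICT (by name: the statement is the Claim_ definition above) =====
theorem opt_sum_spec : Claim_equal_opt_sum := by
  intro tab _ hpre
  show opt_sum tab = opt_sum_alt tab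
  rw [opt_sum_eq tab hpre, opt_sum_alt_eq tab]
  have hlen : 0 < tab.length := List.length_pos_iff.mpr hpre
  exact pvFs_congr _ _ _ _ _ (by omega) (by omega)
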